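-- pv_equiv track=rewrite | github.com/david02324/Algorithm | Programmers/level 2/programmers-60058.py | solution
-- ===== SOURCE A (Python) =====
-- def check_correct(s):
--     status = 0
--
--     for char in s:
--         if char == '(':
--             status += 1
--         else:
--             status -= 1
--
--         if status < 0:
--             return False
--
--     return status == 0
--
-- def basket_reverse(s):
--     new = ''
--     for char in s:
--         if char == '(':
--             new += ')'
--         else:
--             new += '('
--
--     return new
--
-- def solution(p):
--     if p == '' or check_correct(p):
--         return p
--
--     status = 0
--     v = ''
--     for i in range(len(p)):
--         if p[i] == '(':
--             status -= 1
--         elif p[i] == ')':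
--             status += 1
--
--         if status == 0:
--             u = p[:i+1]
--             if len(p) > i+1:
--                 v = p[i+1:]
--             break
--
--     if check_correct(u):
--         return u + solution(v)
--     else:
--         return '(' + solution(v) + ')' + basket_reverse(u[1:-1])
-- ===== SOURCE B (Python) =====
-- def solution(p):
--     n = len(p)
--     bal = [0] * (n + 1)          # bal[k]: '(' counted +1, every other char -1, over p[:k]
--     for k in range(n):
--         bal[k + 1] = bal[k] + (1 if p[k] == '(' else -1)
--     m = [0] * (n + 1)            # m[k] = min(bal[k:])
--     m[n] = bal[n]
--     for k in range(n - 1, -1, -1):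
--         m[k] = min(bal[k], m[k + 1])
--     front = []
--     back = []
--     j = 0
--     # suffix p[j:] is "correct" iff bal[n] == bal[j] and m[j] >= bal[j]  (O(1) check)
--     while j < n and not (bal[n] == bal[j] and m[j] >= bal[j]):
--         i = j
--         pb = 0                   # paren balance ('(' -1, ')' +1, others 0)
--         cb = 0                   # correctness balance ('(' +1, others -1)
--         ok = True
--         while True:
--             c = p[i]
--             if c == '(':
--                 pb -= 1
--                 cb += 1
--             else:
--                 cb -= 1
--                 if c == ')':
--                     pb += 1
--             if cb < 0:
--                 ok = False
--             i += 1
--             if pb == 0: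
--                 break
--         if ok and cb == 0:
--             front.append(p[j:i])
--         else:
--             front.append('(')
--             back.append(')' + ''.join(')' if c == '(' else '(' for c in p[j + 1:i - 1]))
--         j = i
--     front.append(p[j:])
--     return ''.join(front) + ''.join(reversed(back))
-- ===== Notes on version B (the rewrite author's own statement) =====
-- stated objective: faster
-- what changed: Replaced A's O(n^2) recursion (which re-scans the whole remaining suffix with check_correct at every level and rebuilds slices) by a single-pass iterative loop over precomputed prefix-balance and suffix-minimum arrays, so each suffix-correctness test is O(1), each split scan is over disjoint segments, and the result is assembled incrementally from front/back piece lists.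
import Mathlib
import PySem

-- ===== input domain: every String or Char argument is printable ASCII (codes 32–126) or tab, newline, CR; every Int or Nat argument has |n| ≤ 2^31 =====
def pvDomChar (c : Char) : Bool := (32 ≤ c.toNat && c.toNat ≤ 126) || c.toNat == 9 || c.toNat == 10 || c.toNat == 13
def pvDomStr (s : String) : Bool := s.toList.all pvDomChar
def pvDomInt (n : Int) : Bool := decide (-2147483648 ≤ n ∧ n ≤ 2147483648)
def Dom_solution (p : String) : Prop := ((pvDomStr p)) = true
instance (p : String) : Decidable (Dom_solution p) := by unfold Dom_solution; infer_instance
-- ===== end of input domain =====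

-- B replaces A's O(n^2) recursion (re-running check_correct on the whole remaining suffix at
-- every level) by one iterative pass over precomputed prefix-balance / suffix-minimum arrays
-- (O(1) suffix-correctness tests, disjoint split scans, incremental front/back assembly).


-- ===== PORT A =====
-- check_correct, ported over List Char (status loop with early False on status < 0)
def ccAux : List Char → Int → Bool
  | [], st => st == 0
  | c :: rest, st =>
    let st' := if c = '(' then st + 1 else st - 1
    if st' < 0 then false else ccAux rest st'

def check_correct (s : List Char) : Bool := ccAux s 0

-- basket_reverse, ported over List Char
def basket_reverse (s : List Char) : List Char :=
  s.map (fun c => if c = '(' then ')' else '(')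

-- the `for i in range(len(p))` split loop; `none` = loop ends without break,
-- where Python then raises UnboundLocalError on the unbound `u` (outside Pre_)
def splitAux : List Char → Int → List Char → Option (List Char × List Char)
  | [], _, _ => none
  | c :: rest, status, acc =>
    let status' := if c = '(' then status - 1 else if c = ')' then status + 1 else status
    if status' = 0 then some (acc ++ [c], rest)
    else splitAux rest status' (acc ++ [c])

-- u[1:-1] is (u.drop 1).dropLast (u is nonempty here)
def solutionAux : Nat → List Char → List Char
  | 0, _ => []          -- fuel guard only; length+1 fuel always suffices
  | fuel + 1, l =>
    if l = [] || check_correct l then l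
    else
      match splitAux l 0 [] with
      | none => []      -- Python raises UnboundLocalError here (outside Pre_)
      | some (u, v) =>
        if check_correct u then u ++ solutionAux fuel v
        else '(' :: (solutionAux fuel v ++ ')' :: basket_reverse ((u.drop 1).dropLast))

def solution (p : String) : String :=
  String.ofList (solutionAux (p.toList.length + 1) p.toList)

-- ===== PORT B =====
-- bal array: bal[k] = ('(' as +1, every other char as -1) summed over p[:k]
def balFrom (st : Int) : List Char → List Int
  | [] => [st]
  | c :: r => st :: balFrom (st + (if c = '(' then 1 else -1)) r

-- m array: m[k] = min(bal[k:])
def sufMin : List Int → List Int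
  | [] => []
  | [x] => [x]
  | x :: y :: t =>
    match sufMin (y :: t) with
    | [] => [x]               -- unreachable
    | h :: tl => min x h :: h :: tl

def flipB (c : Char) : Char := if c = '(' then ')' else '('

-- inner `while True` scan: returns (chars consumed, cb, ok); none = IndexError (outside Pre_)
def scanB : List Char → Int → Int → Bool → Option (Nat × Int × Bool)
  | [], _, _, _ => none
  | c :: r, pb, cb, ok =>
    let pb' := if c = '(' then pb - 1 else if c = ')' then pb + 1 else pb
    let cb' := if c = '(' then cb + 1 else cb - 1
    let ok' := if cb' < 0 then false else ok
    if pb' = 0 then some (1, cb', ok')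
    else
      match scanB r pb' cb' ok' with
      | none => none
      | some (k, cbf, okf) => some (k + 1, cbf, okf)

-- outer `while` loop over j, carrying the suffix s = p[j:] and the front/back piece lists
def loopB (bal m : List Int) (n : Nat) :
    Nat → Nat → List Char → List (List Char) → List (List Char) → List Char
  | 0, _, _, _, _ => []     -- fuel guard only; n+1 fuel always suffices
  | fuel + 1, j, s, front, back =>
    if j < n ∧ ¬(bal.getD n 0 = bal.getD j 0 ∧ bal.getD j 0 ≤ m.getD j 0) then
      match scanB s 0 0 true with
      | none => []          -- Python raises IndexError here (outside Pre_)
      | some (k, cb, ok) =>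
        if ok = true ∧ cb = 0 then
          loopB bal m n fuel (j + k) (s.drop k) (front ++ [s.take k]) back
        else
          loopB bal m n fuel (j + k) (s.drop k) (front ++ [['(']])
            (back ++ [')' :: (((s.take k).drop 1).dropLast.map flipB)])
    else (front ++ [s]).flatten ++ back.reverse.flatten

def solution_alt (p : String) : String :=
  String.ofList (loopB (balFrom 0 p.toList) (sufMin (balFrom 0 p.toList)) p.toList.length
    (p.toList.length + 1) 0 p.toList [] [])

-- ===== PRECONDITION & SPEC =====
-- weight sums used to state (not run) A's two balance notions
def wsum (l : List Char) : Int := (l.map (fun c => if c = '(' then (1 : Int) else -1)).sum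
def psum (l : List Char) : Int :=
  (l.map (fun c => if c = '(' then (-1 : Int) else if c = ')' then 1 else 0)).sum

-- "check_correct-style correct": total weight 0 and no prefix goes negative
def pyCorrectB (l : List Char) : Bool :=
  (wsum l == 0) && (List.range (l.length + 1)).all (fun k => decide (0 ≤ wsum (l.take k)))

-- Pre_ = exactly the inputs on which A returns (elsewhere A raises UnboundLocalError on the unbound u):
-- p has equally many '(' and ')' (so every split succeeds), or some suffix starting at a
-- paren-balanced cut point is check_correct-style correct (so A returns early there).
def Pre_solution (p : String) : Prop :=
  psum p.toList = 0 ∨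
    ∃ j ∈ List.range (p.toList.length + 1),
      (j = 0 ∨ psum (p.toList.take j) = 0) ∧ pyCorrectB (p.toList.drop j) = true
instance (p : String) : Decidable (Pre_solution p) := by unfold Pre_solution; infer_instance

def pvWitness_solution : String := ")("

def Spec_solution (p : String) (out : String) : Prop := out = solution_alt p
instance (p : String) (out : String) : Decidable (Spec_solution p out) := by
  unfold Spec_solution; infer_instance

-- ===== CLAIM (what is proved, stated in full; the proofs are below) =====
def Claim_equal_solution : Prop :=
  ∀ (p : String), Dom_solution p → Pre_solution p → Spec_solution p (solution p)

-- ===== LEMMAS AND PROOFS =====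

theorem wsum_cons (c : Char) (l : List Char) :
    wsum (c :: l) = (if c = '(' then 1 else -1) + wsum l := by simp [wsum]

theorem wsum_append (a b : List Char) : wsum (a ++ b) = wsum a + wsum b := by simp [wsum]

theorem psum_cons (c : Char) (l : List Char) :
    psum (c :: l) = (if c = '(' then -1 else if c = ')' then 1 else 0) + psum l := by simp [psum]

theorem psum_append (a b : List Char) : psum (a ++ b) = psum a + psum b := by simp [psum]

theorem wsum_take_add (l : List Char) (j k : Nat) :
    wsum (l.take (j + k)) = wsum (l.take j) + wsum ((l.drop j).take k) := by
  rw [List.take_add, wsum_append]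

theorem psum_take_add (l : List Char) (j k : Nat) :
    psum (l.take (j + k)) = psum (l.take j) + psum ((l.drop j).take k) := by
  rw [List.take_add, psum_append]

-- characterisation of check_correct's loop
theorem cc_iff (s : List Char) : ∀ st : Int,
    ccAux s st = true ↔
      (st + wsum s = 0 ∧ ∀ k, 1 ≤ k → k ≤ s.length → 0 ≤ st + wsum (s.take k)) := by
  induction s with
  | nil =>
    intro st
    simp only [ccAux, wsum, List.map_nil, List.sum_nil, List.length_nil, beq_iff_eq]
    constructor
    · intro h; exact ⟨by omega, by omega⟩
    · intro ⟨h, _⟩; omega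
  | cons c r ih =>
    intro st
    simp only [ccAux]
    set st' := if c = '(' then st + 1 else st - 1 with hst'
    have hw : wsum (c :: r) = (st' - st) + wsum r := by
      rw [wsum_cons]; by_cases hc : c = '(' <;> simp [hc, hst']
    by_cases h : st' < 0
    · simp only [h, if_pos]
      constructor
      · intro hF; exact absurd hF (by simp)
      · rintro ⟨_, hall⟩
        have h1 := hall 1 le_rfl (by simp)
        simp only [List.take_succ_cons, List.take_zero] at h1
        have : wsum [c] = st' - st := by
          rw [show ([c] : List Char) = c :: [] from rfl, wsum_cons]
          by_cases hc : c = '(' <;> simp [hc, hst', wsum]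
        rw [this] at h1; omega
    · simp only [h, if_neg, not_false_iff]
      rw [ih st']
      constructor
      · rintro ⟨h1, h2⟩
        refine ⟨by rw [hw]; omega, ?_⟩
        intro k hk1 hk2
        match k with
        | Nat.succ k' =>
          simp only [List.take_succ_cons, wsum_cons]
          have hwc : (if c = '(' then (1:Int) else -1) = st' - st := by
            by_cases hc : c = '(' <;> simp [hc, hst']
          rw [hwc]
          rcases Nat.eq_zero_or_pos k' with h0 | hpos
          · subst h0; simp [wsum]; omega
          · have := h2 k' hpos (by simpa using hk2)
            omega
      · rintro ⟨h1, h2⟩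
        constructor
        · rw [hw] at h1; omega
        · intro k hk1 hk2
          have := h2 (k + 1) (by omega) (by simpa using hk2)
          simp only [List.take_succ_cons, wsum_cons] at this
          have hwc : (if c = '(' then (1:Int) else -1) = st' - st := by
            by_cases hc : c = '(' <;> simp [hc, hst']
          rw [hwc] at this; omega

theorem pyCorrectB_iff_cc (s : List Char) : pyCorrectB s = true ↔ ccAux s 0 = true := by
  rw [cc_iff s 0]
  simp only [pyCorrectB, Bool.and_eq_true, beq_iff_eq, List.all_eq_true, List.mem_range,
    decide_eq_true_eq]
  constructor
  · rintro ⟨h1, h2⟩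
    exact ⟨by omega, fun k _ hk2 => by have := h2 k (by omega); omega⟩
  · rintro ⟨h1, h2⟩
    refine ⟨by omega, ?_⟩
    intro k hk
    rcases Nat.eq_zero_or_pos k with rfl | hp
    · simp [wsum]
    · have := h2 k hp (by omega); omega

-- the inner scan of B: what it consumes and what cb/ok mean
theorem scan_spec (s : List Char) : ∀ (pb cb : Int) (ok : Bool) (k : Nat) (cbf : Int) (okf : Bool),
    scanB s pb cb ok = some (k, cbf, okf) →
      1 ≤ k ∧ k ≤ s.length ∧ pb + psum (s.take k) = 0 ∧
      (∀ i, 1 ≤ i → i < k → pb + psum (s.take i) ≠ 0) ∧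
      cbf = cb + wsum (s.take k) ∧
      (okf = true ↔ (ok = true ∧ ∀ i, 1 ≤ i → i ≤ k → 0 ≤ cb + wsum (s.take i))) := by
  induction s with
  | nil => intro pb cb ok k cbf okf h; simp [scanB] at h
  | cons c r ih =>
    intro pb cb ok k cbf okf h
    simp only [scanB] at h
    set pb' := if c = '(' then pb - 1 else if c = ')' then pb + 1 else pb with hpb'
    set cb' := if c = '(' then cb + 1 else cb - 1 with hcb'
    set ok' : Bool := if cb' < 0 then false else ok with hok'
    have hps1 : psum ((c :: r).take 1) = pb' - pb := by
      simp only [List.take_succ_cons, List.take_zero, psum_cons]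
      by_cases hc : c = '(' <;> by_cases hc2 : c = ')' <;> simp [hc, hc2, hpb', psum]
    have hws1 : wsum ((c :: r).take 1) = cb' - cb := by
      simp only [List.take_succ_cons, List.take_zero, wsum_cons]
      by_cases hc : c = '(' <;> simp [hc, hcb', wsum]
    by_cases hz : pb' = 0
    · rw [if_pos hz] at h
      obtain ⟨hk, hcbf, hokf⟩ : 1 = k ∧ cb' = cbf ∧ ok' = okf := by
        simpa using h
      subst hk
      refine ⟨le_rfl, by simp, by rw [hps1]; omega, by omega, by rw [hws1]; omega, ?_⟩
      rw [← hokf, hok']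
      constructor
      · intro ht
        by_cases hneg : cb' < 0
        · rw [if_pos hneg] at ht; exact absurd ht (by simp)
        · rw [if_neg hneg] at ht
          refine ⟨ht, ?_⟩
          intro i hi1 hi2
          have : i = 1 := by omega
          subst this
          rw [hws1]; omega
      · rintro ⟨hok, hall⟩
        have := hall 1 le_rfl le_rfl
        rw [hws1] at this
        rw [if_neg (by omega), hok]
    · rw [if_neg hz] at h
      cases hrec : scanB r pb' cb' ok' with
      | none => rw [hrec] at h; simp at h
      | some t =>
        obtain ⟨k0, cbf0, okf0⟩ := t
        rw [hrec] at h
        obtain ⟨hk, hcbf, hokf⟩ : k0 + 1 = k ∧ cbf0 = cbf ∧ okf0 = okf := by simpa using h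
        subst hcbf; subst hokf; subst hk
        obtain ⟨h1, h2, h3, h4, h5, h6⟩ := ih pb' cb' ok' k0 _ _ hrec
        have htake : ∀ i : Nat, (c :: r).take (i + 1) = c :: r.take i := by
          intro i; simp
        have hpsS : ∀ i : Nat, psum ((c :: r).take (i + 1)) = (pb' - pb) + psum (r.take i) := by
          intro i
          rw [htake i, psum_cons]
          have : (if c = '(' then (-1:Int) else if c = ')' then 1 else 0) = pb' - pb := by
            by_cases hc : c = '(' <;> by_cases hc2 : c = ')' <;> simp [hc, hc2, hpb']
          omega
        have hwsS : ∀ i : Nat, wsum ((c :: r).take (i + 1)) = (cb' - cb) + wsum (r.take i) := by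
          intro i
          rw [htake i, wsum_cons]
          have : (if c = '(' then (1:Int) else -1) = cb' - cb := by
            by_cases hc : c = '(' <;> simp [hc, hcb']
          omega
        refine ⟨by omega, by simpa using h2, by rw [hpsS]; omega, ?_, by rw [hwsS]; omega, ?_⟩
        · intro i hi1 hi2
          match i with
          | 1 => rw [hps1]; omega
          | Nat.succ (Nat.succ i') =>
            rw [hpsS (i' + 1)]
            have := h4 (i' + 1) (by omega) (by omega)
            omega
        · rw [h6]
          constructor
          · rintro ⟨hokp, hall⟩
            have hcbnn : ¬ cb' < 0 := by
              by_contra hneg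
              rw [hok', if_pos hneg] at hokp
              exact absurd hokp (by simp)
            rw [hok', if_neg hcbnn] at hokp
            refine ⟨hokp, ?_⟩
            intro i hi1 hi2
            match i with
            | 1 => rw [hws1]; omega
            | Nat.succ (Nat.succ i') =>
              rw [hwsS (i' + 1)]
              have := hall (i' + 1) (by omega) (by omega)
              omega
          · rintro ⟨hokp, hall⟩
            have hcb1 := hall 1 le_rfl (by omega)
            rw [hws1] at hcb1
            refine ⟨by rw [hok', if_neg (by omega)]; exact hokp, ?_⟩
            intro i hi1 hi2
            have := hall (i + 1) (by omega) (by omega)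
            rw [hwsS i] at this
            omega

-- A's split loop and B's scan walk the same automaton
theorem split_scan (s : List Char) : ∀ (st cb : Int) (ok : Bool) (acc : List Char),
    splitAux s st acc = (scanB s st cb ok).map (fun t => (acc ++ s.take t.1, s.drop t.1)) := by
  induction s with
  | nil => intro st cb ok acc; simp [splitAux, scanB]
  | cons c r ih =>
    intro st cb ok acc
    simp only [splitAux, scanB]
    set st' := if c = '(' then st - 1 else if c = ')' then st + 1 else st
    by_cases hz : st' = 0
    · simp [hz]
    · rw [if_neg hz, if_neg hz]
      rw [ih st' (if c = '(' then cb + 1 else cb - 1) (if (if c = '(' then cb + 1 else cb - 1) < 0 then false else ok) (acc ++ [c])]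
      cases hrec : scanB r st' (if c = '(' then cb + 1 else cb - 1) (if (if c = '(' then cb + 1 else cb - 1) < 0 then false else ok) with
      | none => simp
      | some t => simp

theorem scan_some (s : List Char) : ∀ (pb cb : Int) (ok : Bool),
    (∃ i, 1 ≤ i ∧ i ≤ s.length ∧ pb + psum (s.take i) = 0) →
      ∃ t, scanB s pb cb ok = some t := by
  induction s with
  | nil =>
    intro pb cb ok ⟨i, hi1, hi2, _⟩
    simp at hi2; omega
  | cons c r ih =>
    intro pb cb ok ⟨i, hi1, hi2, hi3⟩
    simp only [scanB]
    set pb' := if c = '(' then pb - 1 else if c = ')' then pb + 1 else pb with hpb'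
    by_cases hz : pb' = 0
    · exact ⟨_, by rw [if_pos hz]⟩
    · rw [if_neg hz]
      have hps1 : psum ((c :: r).take 1) = pb' - pb := by
        simp only [List.take_succ_cons, List.take_zero, psum_cons]
        by_cases hc : c = '(' <;> by_cases hc2 : c = ')' <;> simp [hc, hc2, hpb', psum]
      have hige : 2 ≤ i := by
        rcases Nat.lt_or_ge i 2 with h2 | h2
        · have : i = 1 := by omega
          subst this
          rw [hps1] at hi3; omega
        · exact h2
      obtain ⟨t, ht⟩ := ih pb' (if c = '(' then cb + 1 else cb - 1) (if (if c = '(' then cb + 1 else cb - 1) < 0 then false else ok) ⟨i - 1, by omega, by simp at hi2 ⊢; omega, by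
        have : (c :: r).take i = c :: r.take (i - 1) := by
          have : i = (i - 1) + 1 := by omega
          rw [this]; simp
        rw [this, psum_cons] at hi3
        have hw : (if c = '(' then (-1:Int) else if c = ')' then 1 else 0) = pb' - pb := by
          by_cases hc : c = '(' <;> by_cases hc2 : c = ')' <;> simp [hc, hc2, hpb']
        omega⟩
      rw [ht]
      exact ⟨_, rfl⟩

theorem balFrom_length (l : List Char) : ∀ st : Int, (balFrom st l).length = l.length + 1 := by
  induction l with
  | nil => intro st; simp [balFrom]
  | cons c r ih => intro st; simp [balFrom, ih]

theorem balFrom_getD (l : List Char) : ∀ (st : Int) (k : Nat), k ≤ l.length →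
    (balFrom st l).getD k 0 = st + wsum (l.take k) := by
  induction l with
  | nil =>
    intro st k hk
    have : k = 0 := by simpa using hk
    subst this
    simp [balFrom, wsum]
  | cons c r ih =>
    intro st k hk
    match k with
    | 0 => simp [balFrom, wsum]
    | Nat.succ k' =>
      simp only [balFrom, List.getD_cons_succ, List.take_succ_cons, wsum_cons]
      rw [ih _ k' (by simpa using hk)]
      ring

theorem sufMin_length (xs : List Int) : (sufMin xs).length = xs.length := by
  induction xs with
  | nil => simp [sufMin]
  | cons x t ih =>
    match t with
    | [] => simp [sufMin]
    | y :: t' =>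
      simp only [sufMin]
      cases hm : sufMin (y :: t') with
      | nil => rw [hm] at ih; simp at ih
      | cons h tl =>
        rw [hm] at ih
        simp at ih ⊢
        omega

theorem sufMin_le_iff (xs : List Int) : ∀ (j : Nat) (a : Int), j < xs.length →
    (a ≤ (sufMin xs).getD j 0 ↔ ∀ k, j ≤ k → k < xs.length → a ≤ xs.getD k 0) := by
  induction xs with
  | nil => intro j a hj; simp at hj
  | cons x t ih =>
    intro j a hj
    match t with
    | [] =>
      have : j = 0 := by simpa using hj
      subst this
      simp only [sufMin, List.getD_cons_zero, List.length_cons, List.length_nil]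
      constructor
      · intro h k hk1 hk2
        have : k = 0 := by omega
        subst this; simpa
      · intro h; simpa using h 0 le_rfl (by omega)
    | y :: t' =>
      have hlen : (sufMin (y :: t')).length = t'.length + 1 := by simp [sufMin_length]
      cases hm : sufMin (y :: t') with
      | nil => rw [hm] at hlen; simp at hlen
      | cons h tl =>
        have hcons : sufMin (x :: y :: t') = min x h :: h :: tl := by
          simp only [sufMin, hm]
        match j with
        | 0 =>
          rw [hcons]
          simp only [List.getD_cons_zero, le_min_iff]
          have ihy := ih 0 a (by simp)
          rw [hm] at ihy
          simp only [List.getD_cons_zero] at ihy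
          constructor
          · rintro ⟨h1, h2⟩ k _ hk
            match k with
            | 0 => simpa using h1
            | Nat.succ k'' =>
              simp only [List.getD_cons_succ]
              exact ihy.mp h2 k'' (by omega) (by simpa using hk)
          · intro hall
            refine ⟨by simpa using hall 0 le_rfl (by simp), ?_⟩
            rw [ihy]
            intro k hk1 hk2
            simpa using hall (k+1) (by omega) (by simpa using hk2)
        | Nat.succ j' =>
          rw [hcons]
          simp only [List.getD_cons_succ]
          have hmj : (h :: tl).getD j' 0 = (sufMin (y :: t')).getD j' 0 := by rw [hm]
          rw [hmj, ih j' a (by simpa using hj)]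
          constructor
          · intro hall k hk1 hk2
            match k with
            | Nat.succ k'' =>
              simp only [List.getD_cons_succ]
              exact hall k'' (by omega) (by simpa using hk2)
          · intro hall k hk1 hk2
            simpa using hall (k+1) (by omega) (by simpa using hk2)

-- B's O(1) guard is exactly check_correct of the suffix
theorem cond_iff (l : List Char) (j : Nat) (hj : j ≤ l.length) :
    ((balFrom 0 l).getD l.length 0 = (balFrom 0 l).getD j 0 ∧
      (balFrom 0 l).getD j 0 ≤ (sufMin (balFrom 0 l)).getD j 0) ↔
      ccAux (l.drop j) 0 = true := by
  have hn := balFrom_getD l 0 l.length le_rfl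
  have hjv := balFrom_getD l 0 j hj
  rw [List.take_length] at hn
  have hsplit : wsum l = wsum (l.take j) + wsum (l.drop j) := by
    conv_lhs => rw [← List.take_append_drop j l]
    rw [wsum_append]
  have hdlen : (l.drop j).length = l.length - j := List.length_drop ..
  rw [cc_iff]
  rw [sufMin_le_iff (balFrom 0 l) j _ (by rw [balFrom_length]; omega)]
  constructor
  · rintro ⟨h1, h2⟩
    rw [hn, hjv] at h1
    refine ⟨by omega, ?_⟩
    intro k hk1 hk2
    have hkk : j + k ≤ l.length := by omega
    have hh := h2 (j + k) (by omega) (by rw [balFrom_length]; omega)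
    rw [balFrom_getD l 0 (j + k) hkk, hjv] at hh
    rw [wsum_take_add] at hh
    omega
  · rintro ⟨h1, h2⟩
    constructor
    · rw [hn, hjv]; omega
    · intro k hkj hkn
      rw [balFrom_length] at hkn
      rw [balFrom_getD l 0 k (by omega), hjv]
      have hadd := wsum_take_add l j (k - j)
      rw [show j + (k - j) = k by omega] at hadd
      rcases Nat.eq_or_lt_of_le hkj with rfl | hlt
      · omega
      · have := h2 (k - j) (by omega) (by omega)
        omega

-- the invariant carried down A's recursion / B's loop
def InvS (s : List Char) : Prop :=
  psum s = 0 ∨ ∃ j', j' ≤ s.length ∧ (j' = 0 ∨ psum (s.take j') = 0) ∧ ccAux (s.drop j') 0 = true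

theorem basket_eq_map_flipB (u : List Char) : basket_reverse u = u.map flipB := rfl

theorem base_lemma (s l : List Char) (j : Nat) (front back : List (List Char)) (fa' fb' : Nat)
    (hdrop : l.drop j = s) (hj : j ≤ l.length) (hbase : s = [] ∨ ccAux s 0 = true) :
    loopB (balFrom 0 l) (sufMin (balFrom 0 l)) l.length (fb' + 1) j s front back
      = front.flatten ++ solutionAux (fa' + 1) s ++ back.reverse.flatten := by
  have hslen : s.length = l.length - j := by rw [← hdrop]; exact List.length_drop ..
  have hcond := cond_iff l j hj
  rw [hdrop] at hcond
  have hA : solutionAux (fa' + 1) s = s := by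
    rcases hbase with h | h
    · simp [solutionAux, check_correct, h]
    · simp [solutionAux, check_correct, h]
  have hguard : ¬ (j < l.length ∧ ¬((balFrom 0 l).getD l.length 0 = (balFrom 0 l).getD j 0 ∧
      (balFrom 0 l).getD j 0 ≤ (sufMin (balFrom 0 l)).getD j 0)) := by
    rcases hbase with h | h
    · intro hc
      have h1 := hc.1
      rw [h] at hslen
      simp at hslen
      omega
    · intro hc
      exact hc.2 (hcond.mpr h)
  simp only [loopB]
  rw [if_neg hguard, hA]
  simp [List.flatten_append]

theorem main_lemma : ∀ (N : Nat) (s l : List Char) (j : Nat)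
    (front back : List (List Char)) (fa fb : Nat),
    s.length ≤ N → l.drop j = s → j ≤ l.length → InvS s →
    s.length + 1 ≤ fa → s.length + 1 ≤ fb →
    loopB (balFrom 0 l) (sufMin (balFrom 0 l)) l.length fb j s front back
      = front.flatten ++ solutionAux fa s ++ back.reverse.flatten := by
  intro N
  induction N with
  | zero =>
    intro s l j front back fa fb hN hdrop hj _ hfa hfb
    have hs : s = [] := by cases s with | nil => rfl | cons a t => simp at hN
    obtain ⟨fa', rfl⟩ : ∃ x, fa = x + 1 := ⟨fa - 1, by omega⟩
    obtain ⟨fb', rfl⟩ : ∃ x, fb = x + 1 := ⟨fb - 1, by omega⟩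
    exact base_lemma s l j front back fa' fb' hdrop hj (Or.inl hs)
  | succ N ih =>
    intro s l j front back fa fb hN hdrop hj hinv hfa hfb
    obtain ⟨fa', rfl⟩ : ∃ x, fa = x + 1 := ⟨fa - 1, by omega⟩
    obtain ⟨fb', rfl⟩ : ∃ x, fb = x + 1 := ⟨fb - 1, by omega⟩
    by_cases hbase : s = [] ∨ ccAux s 0 = true
    · exact base_lemma s l j front back fa' fb' hdrop hj hbase
    · push Not at hbase
      obtain ⟨hne, hccf⟩ := hbase
      have hccf' : ccAux s 0 = false := by simpa using hccf
      have hslen : s.length = l.length - j := by rw [← hdrop]; exact List.length_drop ..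
      have hspos : 1 ≤ s.length := by
        cases s with | nil => exact absurd rfl hne | cons a t => simp
      have hcond := cond_iff l j hj
      rw [hdrop] at hcond
      have hex : ∃ i, 1 ≤ i ∧ i ≤ s.length ∧ (0 : Int) + psum (s.take i) = 0 := by
        rcases hinv with h0 | ⟨j', hj', hz, hc⟩
        · exact ⟨s.length, hspos, le_rfl, by rw [List.take_length]; omega⟩
        · rcases Nat.eq_zero_or_pos j' with rfl | hp
          · rw [List.drop_zero] at hc; exact absurd hc hccf
          · have hz' : psum (s.take j') = 0 := by
              rcases hz with h | h
              · omega
              · exact h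
            exact ⟨j', hp, hj', by omega⟩
      obtain ⟨t, hscan⟩ := scan_some s 0 0 true hex
      obtain ⟨k, cbf, okf⟩ := t
      have hsplit := split_scan s 0 0 true []
      rw [hscan] at hsplit
      simp only [Option.map_some, List.nil_append] at hsplit
      obtain ⟨hk1, hk2, hps, hmin, hcbf, hokf⟩ := scan_spec s 0 0 true k cbf okf hscan
      have hulen : (s.take k).length = k := List.length_take_of_le hk2
      have hutake : ∀ i, i ≤ k → (s.take k).take i = s.take i := by
        intro i hi; rw [List.take_take, min_eq_left hi]
      have hbr : (okf = true ∧ cbf = 0) ↔ ccAux (s.take k) 0 = true := by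
        rw [cc_iff (s.take k) 0]
        constructor
        · rintro ⟨hok, hcb⟩
          obtain ⟨-, hall⟩ := hokf.mp hok
          constructor
          · omega
          · intro i h1 h2
            rw [hulen] at h2
            rw [hutake i h2]
            have := hall i h1 h2
            omega
        · rintro ⟨h1, h2⟩
          constructor
          · rw [hokf]
            refine ⟨rfl, ?_⟩
            intro i hi1 hi2
            have := h2 i hi1 (by rw [hulen]; exact hi2)
            rw [hutake i hi2] at this
            omega
          · omega
      have hguard : (j < l.length ∧ ¬((balFrom 0 l).getD l.length 0 = (balFrom 0 l).getD j 0 ∧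
          (balFrom 0 l).getD j 0 ≤ (sufMin (balFrom 0 l)).getD j 0)) := by
        refine ⟨by omega, ?_⟩
        intro hcnd
        rw [hcond.mp hcnd] at hccf'
        simp at hccf'
      have hvlen : (s.drop k).length = s.length - k := List.length_drop ..
      have hdrop' : l.drop (j + k) = s.drop k := by
        rw [← List.drop_drop, hdrop]
      have hinv' : InvS (s.drop k) := by
        rcases hinv with h0 | ⟨j', hj', hz, hc⟩
        · left
          have hsp : psum s = psum (s.take k) + psum (s.drop k) := by
            conv_lhs => rw [← List.take_append_drop k s]
            rw [psum_append]
          omega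
        · rcases Nat.eq_zero_or_pos j' with rfl | hp
          · rw [List.drop_zero] at hc; exact absurd hc hccf
          · have hz' : psum (s.take j') = 0 := by
              rcases hz with h | h
              · omega
              · exact h
            have hjk : k ≤ j' := by
              by_contra hcon
              push Not at hcon
              exact (hmin j' hp hcon) (by omega)
            have hadd := psum_take_add s k (j' - k)
            rw [show k + (j' - k) = j' by omega] at hadd
            right
            refine ⟨j' - k, by omega, ?_, ?_⟩
            · rcases Nat.eq_or_lt_of_le hjk with rfl | hlt
              · left; omega
              · right; omega
            · rw [List.drop_drop, show k + (j' - k) = j' by omega]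
              exact hc
      have hAunf : solutionAux (fa' + 1) s =
          (if ccAux (s.take k) 0 = true then (s.take k) ++ solutionAux fa' (s.drop k)
           else '(' :: (solutionAux fa' (s.drop k) ++
             ')' :: basket_reverse (((s.take k).drop 1).dropLast))) := by
        simp only [solutionAux, check_correct, hsplit, hccf']
        simp [hne]
      simp only [loopB]
      rw [if_pos hguard]
      simp only [hscan]
      by_cases hcc_u : ccAux (s.take k) 0 = true
      · rw [if_pos (hbr.mpr hcc_u)]
        rw [ih (s.drop k) l (j + k) (front ++ [s.take k]) back fa' fb'
          (by omega) hdrop' (by omega) hinv' (by omega) (by omega)]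
        rw [hAunf, if_pos hcc_u]
        simp [List.flatten_append, List.append_assoc]
      · rw [if_neg (fun hc => hcc_u (hbr.mp hc))]
        rw [ih (s.drop k) l (j + k) (front ++ [['(']])
          (back ++ [')' :: (((s.take k).drop 1).dropLast.map flipB)]) fa' fb'
          (by omega) hdrop' (by omega) hinv' (by omega) (by omega)]
        rw [hAunf, if_neg hcc_u]
        rw [basket_eq_map_flipB]
        simp [List.flatten_append, List.append_assoc]

-- ===== VERDICT (by name: the statement is the Claim_ definition above) =====
theorem solution_spec : Claim_equal_solution := by
  intro p _ hpre
  unfold Spec_solution solution solution_alt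
  have h := main_lemma p.toList.length p.toList p.toList 0 [] []
      (p.toList.length + 1) (p.toList.length + 1) le_rfl rfl (Nat.zero_le _) ?_ le_rfl le_rfl
  · simp only [List.flatten_nil, List.reverse_nil, List.nil_append, List.append_nil] at h
    rw [h]
  · -- Pre_solution → InvSS
    rcases hpre with h0 | ⟨j, hj, hz, hc⟩
    · exact Or.inl h0
    · exact Or.inr ⟨j, by simpa using List.mem_range.mp hj, hz, (pyCorrectB_iff_cc _).mp hc⟩
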